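-- pv_equiv track=rewrite | github.com/Xnhyacinth/ResAdapt | lmms-eval/lmms_eval/models/chat/vllm_generate_autothink.py | _extract_boxed_segments
-- ===== SOURCE A (Python) =====
-- from typing import Any, Dict, List, Optional, Tuple
--
-- def _extract_boxed_segments(text: str) -> List[str]:
--     segments: List[str] = []
--     idx = 0
--     while True:
--         start = text.find("\\boxed{", idx)
--         if start == -1:
--             break
--         i = start + len("\\boxed{")
--         depth = 1
--         j = i
--         while j < len(text) and depth > 0:
--             if text[j] == "{":
--                 depth += 1
--             elif text[j] == "}":
--                 depth -= 1
--             j += 1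
--         if depth == 0:
--             segments.append(text[start:j])
--             idx = j
--         else:
--             break
--     return segments
-- ===== SOURCE B (Python) =====
-- def _extract_boxed_segments(text):
--     marker = "\\boxed{"
--     n = len(text)
--     # stage 1: every marker occurrence position, one comprehension
--     occs = [k for k in range(n) if text.startswith(marker, k)]
--     # stage 2: match every '{' to its '}' with one global stack pass
--     match = {}
--     stack = []
--     for j, ch in enumerate(text):
--         if ch == "{":
--             stack.append(j)
--         elif ch == "}" and stack:
--             match[stack.pop()] = j
--     # stage 3: emit segments by dictionary lookup, no per-segment scan
--     segments = []
--     end = 0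
--     for k in occs:
--         if k >= end:
--             close = match.get(k + 6)
--             if close is None:
--                 break
--             segments.append(text[k : close + 1])
--             end = close + 1
--     return segments
-- ===== Notes on version B (the rewrite author's own statement) =====
-- stated objective: alternative
-- what changed: B replaces A's find-then-count-per-segment loop by three staged passes: a comprehension listing all marker positions, a global stack pass that records in a dictionary which closing brace matches each opening brace, and an emit loop that slices each segment by dictionary lookup with no per-segment counting; it trades some constant-factor speed for this decomposition.
import Mathlib
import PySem

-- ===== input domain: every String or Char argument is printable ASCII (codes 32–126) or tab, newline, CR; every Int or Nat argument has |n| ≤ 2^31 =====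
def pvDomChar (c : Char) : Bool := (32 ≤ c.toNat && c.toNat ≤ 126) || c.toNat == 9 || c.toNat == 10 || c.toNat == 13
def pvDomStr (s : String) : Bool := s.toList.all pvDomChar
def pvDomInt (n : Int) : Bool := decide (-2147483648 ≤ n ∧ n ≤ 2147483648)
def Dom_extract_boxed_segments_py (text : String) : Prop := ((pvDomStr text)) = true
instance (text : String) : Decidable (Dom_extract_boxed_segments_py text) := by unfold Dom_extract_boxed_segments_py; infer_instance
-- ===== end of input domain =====

-- B replaces A's find-then-brace-count-per-segment loop by three staged passes:
-- all marker positions (comprehension), a global stack pass recording in a dictionary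
-- which closing brace matches each opening brace, and an emit loop slicing segments by
-- dictionary lookup (alternative algorithm, same asymptotic cost).


-- ===== PORT A =====
-- "\\boxed{" as a character list
def pvBoxedA : List Char := "\\boxed{".toList

-- inner loop of A: `while j < len(text) and depth > 0: …; j += 1`, returns final (j, depth);
-- structural fuel only makes it total (fuel = cs.length always suffices: j grows each step)
def pvA_inner (cs : List Char) : Nat → Nat → Int → Nat × Int
  | 0, j, depth => (j, depth)
  | fuel + 1, j, depth =>
    if h : j < cs.length ∧ 0 < depth then
      let c := cs[j]'h.1
      pvA_inner cs fuel (j + 1) (if c = '{' then depth + 1 else if c = '}' then depth - 1 else depth)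
    else (j, depth)

-- outer `while True` loop of A; the fuel only makes it total (each iteration moves idx
-- forward by ≥ 7, so the initial fuel cs.length + 1 is never exhausted)
def pvA_loop (cs : List Char) : Nat → Nat → List (List Char)
  | 0, _ => []
  | fuel + 1, idx =>
    let start := PySem.Chars.findFrom cs pvBoxedA (idx : Int) none
    if start = -1 then []
    else
      let s := start.toNat
      let r := pvA_inner cs cs.length (s + 7) 1
      if r.2 = 0 then
        PySem.List.slice cs (some (s : Int)) (some ((r.1 : Nat) : Int)) :: pvA_loop cs fuel r.1
      else []

def extract_boxed_segments_py (text : String) : List String :=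
  (pvA_loop text.toList (text.toList.length + 1) 0).map String.ofList

-- ===== PORT B =====
def pvBoxedB : List Char := "\\boxed{".toList

-- stage 1 of Source B: `[k for k in range(n) if text.startswith(marker, k)]`
-- (text.startswith(marker, k) is exactly `marker <+: cs.drop k` for 0 ≤ k < n)
def pvB_occs (cs : List Char) : List Nat :=
  (List.range cs.length).filter (fun k => pvBoxedB.isPrefixOf (cs.drop k))

-- stage 2 of Source B: `for j, ch in enumerate(text): …` with a stack of open-brace
-- positions and a dict sending each opening brace to its closing brace (j is the
-- running enumerate index)
def pvB_stack : List Char → Nat → PySem.Dict Nat Nat × List Nat → PySem.Dict Nat Nat × List Nat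
  | [], _, st => st
  | c :: rest, j, (m, stk) =>
    pvB_stack rest (j + 1)
      (if c = '{' then (m, j :: stk)
       else if c = '}' then
         match stk with
         | [] => (m, stk)
         | p :: s => (m.insert p j, s)
       else (m, stk))

-- stage 3 of Source B: the emit loop over occurrences (`break` = stop recursing)
def pvB_emit (cs : List Char) (m : PySem.Dict Nat Nat) : List Nat → Nat → List (List Char)
  | [], _ => []
  | k :: ks, e =>
    if e ≤ k then
      match m.get? (k + 6) with
      | none => []
      | some close =>
          PySem.List.slice cs (some (k : Int)) (some ((close + 1 : Nat) : Int)) ::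
            pvB_emit cs m ks (close + 1)
    else pvB_emit cs m ks e

def extract_boxed_segments_py_alt (text : String) : List String :=
  let cs := text.toList
  let st := pvB_stack cs 0 (PySem.Dict.empty, [])
  (pvB_emit cs st.1 (pvB_occs cs) 0).map String.ofList

-- ===== PRECONDITION & SPEC =====
def Spec_extract_boxed_segments_py (text : String) (out : List String) : Prop := out = extract_boxed_segments_py_alt text
instance (text : String) (out : List String) : Decidable (Spec_extract_boxed_segments_py text out) := by unfold Spec_extract_boxed_segments_py; infer_instance

-- ===== CLAIM (what is proved, stated in full; the proofs are below) =====
def Claim_equal_extract_boxed_segments_py : Prop := ∀ (text : String), Dom_extract_boxed_segments_py text → Spec_extract_boxed_segments_py text (extract_boxed_segments_py text)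

-- ===== LEMMAS AND PROOFS =====

theorem pvBoxed_eq : pvBoxedB = pvBoxedA := rfl

-- brace balance of cs[a:b]: +1 per '{', -1 per '}'
def pvDelta (c : Char) : Int := if c = '{' then 1 else if c = '}' then -1 else 0

def pvBal (cs : List Char) (a b : Nat) : Int := (((cs.drop a).take (b - a)).map pvDelta).sum

theorem pvBal_self (cs : List Char) (a : Nat) : pvBal cs a a = 0 := by
  simp [pvBal]

theorem pvBal_succ (cs : List Char) {a t : Nat} (ha : a ≤ t) (ht : t < cs.length) :
    pvBal cs a (t + 1) = pvBal cs a t + pvDelta (cs[t]'ht) := by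
  unfold pvBal
  have h1 : t + 1 - a = (t - a) + 1 := by omega
  rw [h1, List.take_succ]
  have h2 : (cs.drop a)[t - a]? = some (cs[t]'ht) := by
    rw [List.getElem?_drop]
    rw [List.getElem?_eq_getElem (by omega)]
    congr 1
    congr 1
    omega
  rw [h2]
  simp

theorem pvBal_cons (cs : List Char) {j t : Nat} (hj : j < cs.length) (ht : j < t) :
    pvBal cs j t = pvDelta (cs[j]'hj) + pvBal cs (j + 1) t := by
  unfold pvBal
  rw [List.drop_eq_getElem_cons hj]
  have h1 : t - j = (t - (j + 1)) + 1 := by omega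
  rw [h1, List.take_succ_cons]
  simp [add_comm]

-- pvDelta is -1, 0 or 1
theorem pvDelta_cases (c : Char) : pvDelta c = 1 ∨ pvDelta c = -1 ∨ pvDelta c = 0 := by
  unfold pvDelta; split_ifs <;> simp

-- A's if-chain update is exactly `depth + pvDelta c`
theorem pvStep_eq (c : Char) (d : Int) :
    (if c = '{' then d + 1 else if c = '}' then d - 1 else d) = d + pvDelta c := by
  unfold pvDelta; split_ifs <;> ring

-- ----- characterisation of A's inner loop via pvBal -----

theorem pvA_inner_stop_depth (cs : List Char) (f j : Nat) (d : Int) (hd : d ≤ 0) :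
    pvA_inner cs f j d = (j, d) := by
  cases f with
  | zero => rfl
  | succ f => rw [pvA_inner, dif_neg (by omega)]

theorem pvA_innerSpec (cs : List Char) :
    ∀ (f j : Nat) (d : Int), cs.length - j ≤ f → 0 < d → j ≤ cs.length →
      j ≤ (pvA_inner cs f j d).1 ∧ (pvA_inner cs f j d).1 ≤ cs.length ∧
      (pvA_inner cs f j d).2 = d + pvBal cs j (pvA_inner cs f j d).1 ∧
      (∀ t, j ≤ t → t < (pvA_inner cs f j d).1 → 0 < d + pvBal cs j t) ∧
      ((pvA_inner cs f j d).2 ≠ 0 → (pvA_inner cs f j d).1 = cs.length) := by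
  intro f
  induction f with
  | zero =>
    intro j d hf hd hj
    have hje : j = cs.length := by omega
    have hv : pvA_inner cs 0 j d = (j, d) := rfl
    rw [hv]
    refine ⟨le_rfl, hj, by rw [pvBal_self]; ring, fun t h1 h2 => absurd (lt_of_le_of_lt h1 h2) (lt_irrefl _), fun _ => hje⟩
  | succ f ih =>
    intro j d hf hd hj
    by_cases hjl : j < cs.length
    · rw [pvA_inner, dif_pos ⟨hjl, hd⟩]
      simp only
      rw [pvStep_eq]
      set d' := d + pvDelta (cs[j]'hjl) with hd'
      have hbal1 : pvBal cs j (j + 1) = pvDelta (cs[j]'hjl) := by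
        rw [pvBal_succ cs (le_refl j) hjl, pvBal_self]; ring
      by_cases hz : d' ≤ 0
      · have hz0 : d' = 0 := by
          rcases pvDelta_cases (cs[j]'hjl) with h | h | h <;> omega
        rw [pvA_inner_stop_depth cs f (j + 1) d' hz]
        refine ⟨by omega, by omega, ?_, ?_, by simp [hz0]⟩
        · simp only
          rw [pvBal_succ cs (le_refl j) hjl, pvBal_self]
          omega
        · intro t h1 h2
          simp only at h2
          have : t = j := by omega
          rw [this, pvBal_self]
          omega
      · push_neg at hz
        obtain ⟨g1, g2, g3, g4, g5⟩ := ih (j + 1) d' (by omega) hz (by omega)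
        refine ⟨by omega, g2, ?_, ?_, g5⟩
        · rw [g3, pvBal_cons cs hjl (by omega)]
          ring
        · intro t h1 h2
          rcases eq_or_lt_of_le h1 with h | h
          · rw [← h, pvBal_self]; omega
          · have := g4 t (by omega) h2
            rw [pvBal_cons cs hjl h]
            omega
    · have hje : j = cs.length := by omega
      rw [pvA_inner, dif_neg (by omega)]
      refine ⟨le_rfl, hj, by rw [pvBal_self]; ring, fun t h1 h2 => absurd (lt_of_le_of_lt h1 h2) (lt_irrefl _), fun _ => hje⟩

-- `Closed cs p j`: the '{' at p is closed by the '}' at j (first zero of the depth count)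
def pvClosed (cs : List Char) (p j : Nat) : Prop :=
  p < j ∧ j < cs.length ∧ (∀ t, p < t → t ≤ j → 0 < 1 + pvBal cs (p + 1) t) ∧
    1 + pvBal cs (p + 1) (j + 1) = 0

-- a closed '{' at p makes A's inner scan from p+1 stop exactly at j+1 with depth 0
theorem pvClosed_inner (cs : List Char) {p j : Nat} (hC : pvClosed cs p j)
    (f : Nat) (hf : cs.length - (p + 1) ≤ f) :
    pvA_inner cs f (p + 1) 1 = (j + 1, 0) := by
  obtain ⟨hpj, hjl, hpos, hzero⟩ := hC
  obtain ⟨g1, g2, g3, g4, g5⟩ := pvA_innerSpec cs f (p + 1) 1 hf one_pos (by omega)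
  set r := pvA_inner cs f (p + 1) 1 with hr
  have hb : r.1 = j + 1 := by
    rcases lt_trichotomy r.1 (j + 1) with h | h | h
    · exfalso
      have ht : 0 < 1 + pvBal cs (p + 1) r.1 := hpos r.1 (by omega) (by omega)
      have : r.2 ≠ 0 := by omega
      have := g5 this
      omega
    · exact h
    · exfalso
      have := g4 (j + 1) (by omega) h
      omega
  have he : r.2 = 0 := by rw [g3, hb]; omega
  have : r = (r.1, r.2) := rfl
  rw [this, hb, he]

-- a never-closed '{' at p makes A's inner scan end with nonzero depth
theorem pvOpen_inner (cs : List Char) {p : Nat} (hp : p < cs.length)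
    (hpos : ∀ t, p < t → t ≤ cs.length → 0 < 1 + pvBal cs (p + 1) t)
    (f : Nat) (hf : cs.length - (p + 1) ≤ f) :
    (pvA_inner cs f (p + 1) 1).2 ≠ 0 := by
  obtain ⟨g1, g2, g3, g4, g5⟩ := pvA_innerSpec cs f (p + 1) 1 hf one_pos (by omega)
  intro hz
  rw [g3] at hz
  have := hpos (pvA_inner cs f (p + 1) 1).1 (by omega) g2
  omega

-- ----- the stack-pass invariant -----

-- element r (from the top) of the stack is an open '{' at depth r+1, never closed so far
def pvStkElem (cs : List Char) (k p r : Nat) : Prop :=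
  p < k ∧ (∀ t, p < t → t ≤ k → 0 < 1 + pvBal cs (p + 1) t) ∧ 1 + pvBal cs (p + 1) k = r + 1

def pvInv (cs : List Char) (k : Nat) (m : PySem.Dict Nat Nat) (stk : List Nat) : Prop :=
  (∀ (r : Nat) (hr : r < stk.length), pvStkElem cs k (stk[r]'hr) r) ∧
  (∀ p j, m.get? p = some j → pvClosed cs p j) ∧
  (∀ p, p < k → ∀ (hp : p < cs.length), cs[p]'hp = '{' → (m.get? p).isSome = true ∨ p ∈ stk)

theorem pvInv_zero (cs : List Char) : pvInv cs 0 PySem.Dict.empty [] := by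
  refine ⟨fun r hr => absurd hr (by simp), fun p j h => ?_, fun p hp => absurd hp (by omega)⟩
  rw [PySem.Dict.get?_empty] at h
  exact absurd h (by simp)

-- one step of the stack pass preserves the invariant
theorem pvInv_step (cs : List Char) (k : Nat) (m : PySem.Dict Nat Nat) (stk : List Nat)
    (hk : k < cs.length) (hinv : pvInv cs k m stk) :
    pvInv cs (k + 1)
      (if (cs[k]'hk) = '{' then (m, k :: stk)
       else if (cs[k]'hk) = '}' then
         match stk with
         | [] => (m, stk)
         | p :: s => (m.insert p k, s)
       else (m, stk)).1
      (if (cs[k]'hk) = '{' then (m, k :: stk)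
       else if (cs[k]'hk) = '}' then
         match stk with
         | [] => (m, stk)
         | p :: s => (m.insert p k, s)
       else (m, stk)).2 := by
  obtain ⟨hstk, hm, hcomp⟩ := hinv
  have hbal : ∀ p : Nat, p < k → pvBal cs (p + 1) (k + 1) = pvBal cs (p + 1) k + pvDelta (cs[k]'hk) :=
    fun p hp => pvBal_succ cs (by omega) hk
  by_cases h1 : (cs[k]'hk) = '{'
  · rw [if_pos h1]
    have hd : pvDelta (cs[k]'hk) = 1 := by simp [pvDelta, h1]
    refine ⟨?_, hm, ?_⟩
    · intro r hr
      cases r with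
      | zero =>
        simp only [List.getElem_cons_zero]
        refine ⟨by omega, ?_, ?_⟩
        · intro t ht1 ht2
          have : t = k + 1 := by omega
          rw [this, pvBal_self]
          omega
        · rw [pvBal_self]
          omega
      | succ r =>
        have hr' : r < stk.length := by simpa using hr
        obtain ⟨e1, e2, e3⟩ := hstk r hr'
        simp only [List.getElem_cons_succ]
        refine ⟨by omega, ?_, ?_⟩
        · intro t ht1 ht2
          rcases Nat.lt_or_ge t (k + 1) with h | h
          · exact e2 t ht1 (by omega)
          · have : t = k + 1 := by omega
            rw [this, hbal _ e1, hd]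
            omega
        · rw [hbal _ e1, hd]
          push_cast
          omega
    · intro p hp hpl hpc
      rcases Nat.lt_or_ge p k with h | h
      · rcases hcomp p h hpl hpc with h' | h'
        · exact Or.inl h'
        · exact Or.inr (List.mem_cons_of_mem _ h')
      · have : p = k := by omega
        exact Or.inr (this ▸ List.mem_cons_self)
  · rw [if_neg h1]
    by_cases h2 : (cs[k]'hk) = '}'
    · rw [if_pos h2]
      have hd : pvDelta (cs[k]'hk) = -1 := by simp [pvDelta, h2]
      cases stk with
      | nil =>
        refine ⟨fun r hr => absurd hr (by simp), hm, ?_⟩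
        intro p hp hpl hpc
        rcases Nat.lt_or_ge p k with h | h
        · exact hcomp p h hpl hpc
        · exfalso
          have hpk : p = k := by omega
          subst hpk
          exact absurd (hpc.symm.trans h2) (by decide)
      | cons p0 s =>
        simp only
        obtain ⟨e1, e2, e3⟩ := hstk 0 (by simp)
        simp only [List.getElem_cons_zero] at e1 e2 e3
        have hclosed : pvClosed cs p0 k := by
          refine ⟨e1, hk, e2, ?_⟩
          rw [hbal _ e1, hd]
          push_cast at e3
          omega
        refine ⟨?_, ?_, ?_⟩
        · intro r hr
          have hr' : r + 1 < (p0 :: s).length := by simpa using Nat.succ_lt_succ hr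
          obtain ⟨e1', e2', e3'⟩ := hstk (r + 1) hr'
          simp only [List.getElem_cons_succ] at e1' e2' e3'
          refine ⟨by omega, ?_, ?_⟩
          · intro t ht1 ht2
            rcases Nat.lt_or_ge t (k + 1) with h | h
            · exact e2' t ht1 (by omega)
            · have : t = k + 1 := by omega
              rw [this, hbal _ e1', hd]
              push_cast at e3'
              have := e2' k (by omega) (by omega)
              omega
          · rw [hbal _ e1', hd]
            omega
        · intro p j hget
          rw [PySem.Dict.get?_insert] at hget
          by_cases hpp : p = p0
          · rw [if_pos hpp] at hget
            have : j = k := by injection hget with h; omega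
            rw [hpp, this]
            exact hclosed
          · rw [if_neg hpp] at hget
            exact hm p j hget
        · intro p hp hpl hpc
          rcases Nat.lt_or_ge p k with h | h
          · rcases hcomp p h hpl hpc with h' | h'
            · left
              rw [PySem.Dict.get?_insert]
              by_cases hpp : p = p0
              · rw [if_pos hpp]; simp
              · rw [if_neg hpp]; exact h'
            · rcases List.mem_cons.mp h' with h'' | h''
              · left
                rw [PySem.Dict.get?_insert, if_pos h'']
                simp
              · exact Or.inr h''
          · exfalso
            have hpk : p = k := by omega
            subst hpk
            exact absurd (hpc.symm.trans h2) (by decide)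
    · rw [if_neg h2]
      have hd : pvDelta (cs[k]'hk) = 0 := by simp [pvDelta, h1, h2]
      simp only
      refine ⟨?_, hm, ?_⟩
      · intro r hr
        obtain ⟨e1, e2, e3⟩ := hstk r hr
        refine ⟨by omega, ?_, ?_⟩
        · intro t ht1 ht2
          rcases Nat.lt_or_ge t (k + 1) with h | h
          · exact e2 t ht1 (by omega)
          · have : t = k + 1 := by omega
            rw [this, hbal _ e1, hd]
            omega
        · rw [hbal _ e1, hd]
          omega
      · intro p hp hpl hpc
        rcases Nat.lt_or_ge p k with h | h
        · exact hcomp p h hpl hpc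
        · exfalso
          have hpk : p = k := by omega
          subst hpk
          exact h1 hpc

-- one unfolding of the stack pass
theorem pvB_stack_cons (c : Char) (rest : List Char) (j : Nat) (m : PySem.Dict Nat Nat) (stk : List Nat) :
    pvB_stack (c :: rest) j (m, stk) = pvB_stack rest (j + 1)
      (if c = '{' then (m, j :: stk)
       else if c = '}' then
         (match stk with
          | [] => (m, stk)
          | p :: s => (m.insert p j, s))
       else (m, stk)) := by
  cases stk <;> rfl

-- running the stack pass from an invariant state yields the invariant at the end
theorem pvInv_run (cs : List Char) :
    ∀ (rest : List Char) (j : Nat) (m : PySem.Dict Nat Nat) (stk : List Nat),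
      rest = cs.drop j → j ≤ cs.length → pvInv cs j m stk →
      pvInv cs cs.length (pvB_stack rest j (m, stk)).1 (pvB_stack rest j (m, stk)).2 := by
  intro rest
  induction rest with
  | nil =>
    intro j m stk hdrop hj hinv
    have : cs.length ≤ j := by
      have := congrArg List.length hdrop
      simp at this
      omega
    have hje : j = cs.length := by omega
    rw [pvB_stack]
    exact hje ▸ hinv
  | cons c rest ih =>
    intro j m stk hdrop hj hinv
    have hlen : j < cs.length := by
      have := congrArg List.length hdrop
      simp at this
      omega
    have hc : cs[j]'hlen = c := by
      have h0 := congrArg (fun l => l[0]?) hdrop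
      simp only [List.getElem?_cons_zero, List.getElem?_drop, Nat.add_zero] at h0
      obtain ⟨hh, h⟩ := List.getElem?_eq_some_iff.mp h0.symm
      exact h
    have hrest : rest = cs.drop (j + 1) := by
      have := congrArg List.tail hdrop
      simpa [List.tail_drop] using this
    rw [pvB_stack_cons]
    have hstep := pvInv_step cs j m stk hlen hinv
    rw [hc] at hstep
    cases stk with
    | nil =>
      by_cases h1 : c = '{'
      · rw [if_pos h1] at hstep ⊢
        exact ih (j + 1) m [j] hrest (by omega) hstep
      · rw [if_neg h1] at hstep ⊢
        by_cases h2 : c = '}'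
        · rw [if_pos h2] at hstep ⊢
          exact ih (j + 1) m [] hrest (by omega) hstep
        · rw [if_neg h2] at hstep ⊢
          exact ih (j + 1) m [] hrest (by omega) hstep
    | cons p s =>
      by_cases h1 : c = '{'
      · rw [if_pos h1] at hstep ⊢
        exact ih (j + 1) m (j :: p :: s) hrest (by omega) hstep
      · rw [if_neg h1] at hstep ⊢
        by_cases h2 : c = '}'
        · rw [if_pos h2] at hstep ⊢
          exact ih (j + 1) (m.insert p j) s hrest (by omega) hstep
        · rw [if_neg h2] at hstep ⊢
          exact ih (j + 1) m (p :: s) hrest (by omega) hstep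

-- ----- occurrence list facts -----

theorem pv_mem_occs (cs : List Char) (k : Nat) :
    k ∈ pvB_occs cs ↔ k < cs.length ∧ pvBoxedA <+: cs.drop k := by
  unfold pvB_occs
  rw [List.mem_filter, List.mem_range, pvBoxed_eq]
  constructor
  · rintro ⟨h1, h2⟩
    exact ⟨h1, by rwa [List.isPrefixOf_iff_prefix] at h2⟩
  · rintro ⟨h1, h2⟩
    exact ⟨h1, by rwa [List.isPrefixOf_iff_prefix]⟩

theorem pv_occs_sorted (cs : List Char) : (pvB_occs cs).Pairwise (· < ·) :=
  (List.pairwise_lt_range).filter _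

-- a prefix occurrence forces 7 characters to remain
theorem pv_prefix_room {cs : List Char} {pos : Nat} (h : pvBoxedA <+: List.drop pos cs) :
    pos + 7 ≤ cs.length := by
  have := h.length_le
  have hb : pvBoxedA.length = 7 := by decide
  simp only [List.length_drop, hb] at this
  omega

-- the 7th character of an occurrence is '{'
theorem pv_occ_brace {cs : List Char} {k : Nat} (h : pvBoxedA <+: List.drop k cs) :
    ∀ (hk : k + 6 < cs.length), cs[k + 6]'hk = '{' := by
  intro hk
  have hroom := pv_prefix_room h
  have h6 : (List.drop k cs)[6]'(by simp; omega) = pvBoxedA[6]'(by decide) := (List.IsPrefix.getElem h (by decide)).symm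
  rw [List.getElem_drop] at h6
  exact h6.trans (by decide)

-- ----- find characterisation -----

-- no occurrence at or after e ⇒ find returns -1
theorem pv_find_none (cs : List Char) (e : Nat) (he : e ≤ cs.length)
    (h : ∀ k, e ≤ k → ¬ pvBoxedA <+: cs.drop k) :
    PySem.Chars.findFrom cs pvBoxedA (e : Int) none = -1 := by
  rw [PySem.Chars.findFrom_natCast_eq_neg_one_iff cs pvBoxedA e he]
  intro hinf
  obtain ⟨j, hj⟩ := (PySem.Chars.exists_prefix_drop_iff_isIn pvBoxedA (List.drop e cs)).2
    ((PySem.Chars.isIn_iff_infix pvBoxedA (List.drop e cs)).2 hinf)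
  rw [List.drop_drop] at hj
  exact h (e + j) (by omega) hj

-- the first occurrence at or after e is what find returns
theorem pv_find_first (cs : List Char) (e k : Nat) (he : e ≤ cs.length) (hek : e ≤ k)
    (hk : pvBoxedA <+: cs.drop k)
    (hmin : ∀ t, e ≤ t → t < k → ¬ pvBoxedA <+: cs.drop t) :
    PySem.Chars.findFrom cs pvBoxedA (e : Int) none = (k : Int) := by
  have hne : PySem.Chars.findFrom cs pvBoxedA (e : Int) none ≠ -1 := by
    rw [ne_eq, PySem.Chars.findFrom_natCast_eq_neg_one_iff cs pvBoxedA e he]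
    intro hno
    apply hno
    have : List.drop k cs = List.drop (k - e) (List.drop e cs) := by
      rw [List.drop_drop]; congr 1; omega
    rw [this] at hk
    exact hk.isInfix.trans (List.drop_suffix _ _).isInfix
  obtain ⟨g1, g2, g3⟩ := PySem.Chars.findFrom_natCast_spec cs pvBoxedA e he hne
  set q := PySem.Chars.findFrom cs pvBoxedA (e : Int) none with hq
  have hq0 : (0 : Int) ≤ q := le_trans (by positivity) g1
  rcases lt_trichotomy q.toNat k with h | h | h
  · exact absurd g2 (hmin q.toNat (by omega) h)
  · omega
  · exact absurd hk (g3 k hek h)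

-- ----- main equivalence of the loops -----

theorem pv_main (cs : List Char) (m : PySem.Dict Nat Nat)
    (hm1 : ∀ p j, m.get? p = some j → pvClosed cs p j)
    (hm2 : ∀ p, ∀ (hp : p < cs.length), cs[p]'hp = '{' → m.get? p = none →
      ∀ t, p < t → t ≤ cs.length → 0 < 1 + pvBal cs (p + 1) t) :
    ∀ (L : List Nat) (f e : Nat),
      (∀ k ∈ L, k < cs.length ∧ pvBoxedA <+: cs.drop k) →
      (∀ k, e ≤ k → k < cs.length → pvBoxedA <+: cs.drop k → k ∈ L) →
      L.Pairwise (· < ·) → e ≤ cs.length → cs.length - e < f →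
      pvB_emit cs m L e = pvA_loop cs f e := by
  intro L
  induction L with
  | nil =>
    intro f e _ hL2 _ he hf
    have hfind : PySem.Chars.findFrom cs pvBoxedA (e : Int) none = -1 := by
      apply pv_find_none cs e he
      intro k hk hpre
      have hkl : k < cs.length := by
        have := pv_prefix_room hpre
        omega
      exact absurd (hL2 k hk hkl hpre) (List.not_mem_nil)
    cases f with
    | zero => omega
    | succ f =>
      rw [pvB_emit, pvA_loop, if_pos hfind]
  | cons k ks ih =>
    intro f e hL1 hL2 hsort he hf
    obtain ⟨hkl, hkpre⟩ := hL1 k List.mem_cons_self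
    have hroom : k + 7 ≤ cs.length := pv_prefix_room hkpre
    by_cases hek : e ≤ k
    · -- k is the first occurrence ≥ e
      have hmin : ∀ t, e ≤ t → t < k → ¬ pvBoxedA <+: cs.drop t := by
        intro t ht1 ht2 hpre
        have htl : t < cs.length := by omega
        have := hL2 t ht1 htl hpre
        rcases List.mem_cons.mp this with h | h
        · omega
        · have := List.rel_of_pairwise_cons hsort h
          omega
      have hfind := pv_find_first cs e k he hek hkpre hmin
      cases f with
      | zero => omega
      | succ f =>
        rw [pvA_loop, if_neg (by rw [hfind]; omega)]
        simp only [hfind, Int.toNat_natCast]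
        rw [pvB_emit, if_pos hek]
        have hk6 : k + 6 < cs.length := by omega
        have hbrace := pv_occ_brace hkpre hk6
        cases hget : m.get? (k + 6) with
        | none =>
          have hpos := hm2 (k + 6) hk6 hbrace hget
          have hinner := pvOpen_inner cs hk6 hpos cs.length (by omega)
          have h7 : k + 6 + 1 = k + 7 := by omega
          rw [h7] at hinner
          rw [if_neg hinner]
        | some j =>
          have hclosed := hm1 (k + 6) j hget
          have hinner := pvClosed_inner cs hclosed cs.length (by omega)
          have h7 : k + 6 + 1 = k + 7 := by omega
          rw [h7] at hinner
          rw [hinner]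
          simp only
          rw [if_pos trivial]
          obtain ⟨hpj, hjl, -, -⟩ := hclosed
          congr 1
          apply ih f (j + 1)
          · intro k' hk'
            exact hL1 k' (List.mem_cons_of_mem _ hk')
          · intro k' h1 h2 h3
            have := hL2 k' (by omega) h2 h3
            rcases List.mem_cons.mp this with h | h
            · omega
            · exact h
          · exact hsort.of_cons
          · omega
          · omega
    · -- k < e: skipped by the emit loop, invisible to A
      rw [pvB_emit, if_neg hek]
      apply ih f e
      · intro k' hk'
        exact hL1 k' (List.mem_cons_of_mem _ hk')
      · intro k' h1 h2 h3
        have := hL2 k' h1 h2 h3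
        rcases List.mem_cons.mp this with h | h
        · omega
        · exact h
      · exact hsort.of_cons
      · exact he
      · exact hf

-- ===== VERDICT (by name: the statement is the Claim_ definition above) =====
theorem extract_boxed_segments_py_spec : Claim_equal_extract_boxed_segments_py := by
  intro text _
  unfold Spec_extract_boxed_segments_py extract_boxed_segments_py extract_boxed_segments_py_alt
  simp only
  congr 1
  set cs := text.toList with hcs
  set st := pvB_stack cs 0 (PySem.Dict.empty, []) with hst
  have hinv : pvInv cs cs.length st.1 st.2 :=
    pvInv_run cs cs 0 PySem.Dict.empty [] (by simp) (by omega) (pvInv_zero cs)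
  obtain ⟨hstk, hm1, hcomp⟩ := hinv
  have hm2 : ∀ p, ∀ (hp : p < cs.length), cs[p]'hp = '{' → st.1.get? p = none →
      ∀ t, p < t → t ≤ cs.length → 0 < 1 + pvBal cs (p + 1) t := by
    intro p hp hbr hnone t ht1 ht2
    rcases hcomp p hp hp hbr with h | h
    · rw [hnone] at h; simp at h
    · obtain ⟨r, hr, hrp⟩ := List.mem_iff_getElem.mp h
      obtain ⟨-, e2, -⟩ := hstk r hr
      rw [hrp] at e2
      exact e2 t ht1 ht2
  exact (pv_main cs st.1 hm1 hm2 (pvB_occs cs) (cs.length + 1) 0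
    (fun k' hk' => (pv_mem_occs cs k').mp hk')
    (fun k' _ h2 h3 => (pv_mem_occs cs k').mpr ⟨h2, h3⟩)
    (pv_occs_sorted cs) (by omega) (by omega)).symm
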